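-- pv_equiv track=rewrite | github.com/stan-hua/view_hn | src/drivers/model_eval.py | get_local_groups
-- ===== SOURCE A (Python) =====
-- def get_local_groups(values):
--     """
--     Identify local groups of consecutive labels/predictions in a list of values.
--     Return a list of increasing integers which identify these groups.
--
--     Note
--     ----
--     Input of [1, 1, 2, 1, 1] would return [1, 1, 2, 3, 3]. Groupings would be:
--         - Group 1: (1, 1)
--         - Group 2: (2)
--         - Group 3: (1, 1)
--
--
--     Parameters
--     ----------
--     values: list
--         List of values in some sequential order
--     col : str
--         Name of column to check for consecutive values
--
--     Returns
--     -------
--     list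
--         Increasing integer values, which represent each local group of
--         images with the same label.
--     """
--     curr_val = 0
--     prev_val = None
--     local_groups = []
--
--     for val in values:
--         if val != prev_val:
--             curr_val += 1
--             prev_val = val
--
--         local_groups.append(curr_val)
--
--     return local_groups
-- ===== SOURCE B (Python) =====
-- def get_local_groups(values):
--     vals = list(values)
--     prevs = [None] + vals[:-1]
--     marks = [int(v != p) for v, p in zip(vals, prevs)]
--     out = []
--     total = 0
--     for m in marks:
--         total += m
--         out.append(total)
--     return out
-- ===== Notes on version B (the rewrite author's own statement) =====
-- stated objective: alternative
-- what changed: B separates the work into two passes: it first builds a 0/1 boundary-indicator list by zipping each value with its predecessor, then emits the running prefix sum of those indicators, instead of A's single loop tracking curr_val/prev_val state.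
import Mathlib
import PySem

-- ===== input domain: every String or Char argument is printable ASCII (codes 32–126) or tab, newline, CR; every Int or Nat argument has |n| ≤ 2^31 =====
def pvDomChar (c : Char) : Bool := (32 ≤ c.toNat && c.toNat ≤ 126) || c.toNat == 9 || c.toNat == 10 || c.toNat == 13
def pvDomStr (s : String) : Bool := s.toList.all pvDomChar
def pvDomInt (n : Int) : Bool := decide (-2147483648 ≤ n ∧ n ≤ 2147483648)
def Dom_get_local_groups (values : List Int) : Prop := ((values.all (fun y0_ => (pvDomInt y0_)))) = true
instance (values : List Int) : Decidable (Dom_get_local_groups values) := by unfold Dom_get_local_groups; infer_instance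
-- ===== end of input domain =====

-- B does the same job as A (label consecutive runs with increasing ids) but in two
-- passes: a boundary-indicator list, then its running prefix sum.

-- ===== PORT A =====
-- single loop over values tracking (curr_val, prev_val) and appending curr_val
def getLocalGroupsGoA : List Int → Int → Option Int → List Int → List Int
  | [], _, _, acc => acc
  | v :: vs, curr, prev, acc =>
    if some v ≠ prev then getLocalGroupsGoA vs (curr + 1) (some v) (acc ++ [curr + 1])
    else getLocalGroupsGoA vs curr prev (acc ++ [curr])

def get_local_groups (values : List Int) : List Int :=
  getLocalGroupsGoA values 0 none []

-- ===== PORT B =====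
-- marks = [int(v != p) for v, p in zip(vals, [None] + vals[:-1])]
def getLocalGroupsMarks (values : List Int) : List Int :=
  (values.zip ((none : Option Int) :: values.map some)).map
    (fun vp => if some vp.1 ≠ vp.2 then 1 else 0)

-- the prefix-sum loop: total += m; out.append(total)
def getLocalGroupsAccum : Int → List Int → List Int
  | _, [] => []
  | total, m :: ms => (total + m) :: getLocalGroupsAccum (total + m) ms

def get_local_groups_alt (values : List Int) : List Int :=
  getLocalGroupsAccum 0 (getLocalGroupsMarks values)

-- ===== PRECONDITION & SPEC =====
def Spec_get_local_groups (values : List Int) (out : List Int) : Prop := out = get_local_groups_alt values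
instance (values : List Int) (out : List Int) : Decidable (Spec_get_local_groups values out) := by unfold Spec_get_local_groups; infer_instance

-- ===== CLAIM (what is proved, stated in full; the proofs are below) =====
def Claim_equal_get_local_groups : Prop := ∀ (values : List Int), Dom_get_local_groups values → Spec_get_local_groups values (get_local_groups values)

-- ===== LEMMAS AND PROOFS =====

-- reference recursion: group ids starting from counter c with previous value p
def pvF : Option Int → Int → List Int → List Int
  | _, _, [] => []
  | p, c, v :: vs =>
    if some v = p then c :: pvF p c vs else (c + 1) :: pvF (some v) (c + 1) vs

lemma goA_eq (vs : List Int) : ∀ (c : Int) (p : Option Int) (acc : List Int),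
    getLocalGroupsGoA vs c p acc = acc ++ pvF p c vs := by
  induction vs with
  | nil => intro c p acc; simp [getLocalGroupsGoA, pvF]
  | cons v vs ih =>
    intro c p acc
    by_cases h : some v = p
    · simp [getLocalGroupsGoA, pvF, h, ih]
    · simp [getLocalGroupsGoA, pvF, h, ih]

-- per-position indicator recursion matching the zip-with-predecessor list
def pvInd : Option Int → List Int → List Int
  | _, [] => []
  | p, v :: vs => (if some v = p then 0 else 1) :: pvInd (some v) vs

lemma marks_eq_ind (vs : List Int) : ∀ (p : Option Int),
    ((vs.zip (p :: vs.map some)).map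
      (fun vp => if some vp.1 ≠ vp.2 then 1 else 0)) = pvInd p vs := by
  induction vs with
  | nil => intro p; simp [pvInd]
  | cons v vs ih =>
    intro p
    simp only [List.map_cons, List.zip_cons_cons, pvInd, ih]
    by_cases h : some v = p <;> simp [h]

lemma accum_ind (vs : List Int) : ∀ (p : Option Int) (c : Int),
    getLocalGroupsAccum c (pvInd p vs) = pvF p c vs := by
  induction vs with
  | nil => intro p c; simp [pvInd, pvF, getLocalGroupsAccum]
  | cons v vs ih =>
    intro p c
    by_cases h : some v = p
    · simp [pvInd, pvF, getLocalGroupsAccum, h, ih]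
    · simp [pvInd, pvF, getLocalGroupsAccum, h, ih]

-- ===== VERDICT (by name: the statement is the Claim_ definition above) =====
theorem get_local_groups_spec : Claim_equal_get_local_groups := by
  intro values _
  unfold Spec_get_local_groups get_local_groups get_local_groups_alt getLocalGroupsMarks
  rw [goA_eq, marks_eq_ind, accum_ind]
  simp
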